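-- pv_equiv track=rewrite | github.com/junjihashimoto/py-stacked-dag | stackeddag/core.py | __addBypassNode
-- ===== SOURCE A (Python) =====
-- def __addBypassNode(d, edges, nd, dg):
--     """
--     | Add bypass nodes
--     >>> edges = mkEdges([(0,[1,2]),(1,[2])])
--     >>> nd = getNodeDepth(getDepthGroup2(dict([]),edges))
--     >>> __addBypassNode(2,edges,nd,(dict([(0,([2],[])),(1,([1],[])),(2,([0],[]))])))
--     {0: ([2], []), 1: ([1], [0]), 2: ([0], [])}
--
--     >>> edges = mkEdges([(0,[1,3]),(1,[2]),(2,[3])])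
--     >>> nd = getNodeDepth(getDepthGroup2(dict([]),edges))
--     >>> __addBypassNode(3,edges,nd,(dict( [(0,([3],[])),(1,([2],[])),(2,([1],[])),(3,([0],[]))])))
--     {0: ([3], []), 1: ([2], []), 2: ([1], [0]), 3: ([0], [])}
--     >>> __addBypassNode(2,edges,nd,(dict( [(0,([3],[])),(1,([2],[])),(2,([1],[0])),(3,([0],[]))])))
--     {0: ([3], []), 1: ([2], [0]), 2: ([1], [0]), 3: ([0], [])}
--
--     >>> edges = mkEdges([(0,[1,2]),(1,[4]),(2,[3]),(3,[4])])
--     >>> nd = getNodeDepth(getDepthGroup2(dict([]),edges))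
--     >>> __addBypassNode(2,edges,nd,(dict( [(0,([4],[])),(1,([3,1],[])),(2,([2],[0])),(3,([0],[]))])))
--     {0: ([4], []), 1: ([3, 1], []), 2: ([2], [0]), 3: ([0], [])}
--     """
--     def nodeDepth(nid):
--         if nid in nd:
--             return nd[nid]
--         else:
--             return 0
--     ee = []
--     for i in edges.items():
--         n = i[0]
--         nids = i[1]
--         ss = []
--         for nid in list(nids):
--             if nodeDepth(nid) < d:
--                 ss.append(nid)
--         ee.append((n, set(ss)))
--     _edges = dict(ee)
--     def _elem(nid, nids):
--         if nid in _edges: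
--             m = list(_edges[nid])
--             for n in m:
--                 if not n in nids:
--                     return False
--             return True
--         else:
--             return True
--
--     if d in dg:
--         if d-1 in dg:
--             (nids0, skipnids0) = dg[d]
--             (nids1, skipnids1) = dg[d-1]
--             for i in nids0:
--                 if not _elem(i, nids1):
--                     skipnids1.append(i)
--             for i in skipnids0:
--                 if not _elem(i, nids1):
--                     skipnids1.append(i)
--             dg[d-1] = (nids1, skipnids1)
--     return dg
-- ===== SOURCE B (Python) =====
-- def __addBypassNode(d, edges, nd, dg):
--     if d in dg and d - 1 in dg:
--         nids0, skipnids0 = dg[d]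
--         nids1, skipnids1 = dg[d - 1]
--         present = set(nids1)
--         bad = {t for ts in edges.values() for t in ts
--                if nd.get(t, 0) < d and t not in present}
--         dg[d - 1] = (nids1, skipnids1 + [i for i in nids0 + skipnids0
--                                          if not bad.isdisjoint(edges.get(i, ()))])
--     return dg
-- ===== Notes on version B (the rewrite author's own statement) =====
-- stated objective: faster
-- what changed: Instead of A's per-candidate dependency-satisfaction check against a precomputed depth-filtered edge table, B builds once a global set of 'bad' targets (targets anywhere in edges with depth < d that are missing from level d-1's node list) and classifies each candidate by a single set-disjointness test of its outgoing edges against that bad set; one set built once replaces A's filtered table and per-node all-in-list scans.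
import Mathlib
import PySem

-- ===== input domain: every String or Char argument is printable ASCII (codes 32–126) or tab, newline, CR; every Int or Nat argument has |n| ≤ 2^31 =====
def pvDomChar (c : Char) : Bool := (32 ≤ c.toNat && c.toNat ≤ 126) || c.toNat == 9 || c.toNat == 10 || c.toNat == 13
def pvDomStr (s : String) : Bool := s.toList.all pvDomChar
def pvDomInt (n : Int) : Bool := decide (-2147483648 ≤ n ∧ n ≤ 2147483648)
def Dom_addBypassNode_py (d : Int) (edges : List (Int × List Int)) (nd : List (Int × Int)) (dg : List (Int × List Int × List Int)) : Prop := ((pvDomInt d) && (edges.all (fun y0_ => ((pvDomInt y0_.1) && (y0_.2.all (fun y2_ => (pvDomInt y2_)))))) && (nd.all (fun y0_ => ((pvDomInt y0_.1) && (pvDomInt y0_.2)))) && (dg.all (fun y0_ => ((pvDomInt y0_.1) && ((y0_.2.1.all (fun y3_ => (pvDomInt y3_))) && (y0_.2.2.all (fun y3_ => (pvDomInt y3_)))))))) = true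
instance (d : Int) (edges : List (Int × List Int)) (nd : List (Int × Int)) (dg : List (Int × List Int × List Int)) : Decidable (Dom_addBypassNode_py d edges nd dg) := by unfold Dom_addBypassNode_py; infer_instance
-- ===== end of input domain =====

-- B replaces A's per-candidate dependency-satisfaction check (precomputed depth-filtered edge table,
-- then 'all targets in nids1' per node) by ONE globally built set of bad targets (depth < d and not in
-- nids1) and a set-disjointness test per candidate (objective: alternative). Equivalence is about the
-- RETURN value: Python A extends dg[d-1]'s skip list in place, B rebinds dg[d-1] to a fresh tuple.

-- ===== PORT A =====
-- inner 'def nodeDepth(nid)'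
def pvNodeDepthA (nd : PySem.Dict Int Int) (nid : Int) : Int :=
  if nd.contains nid then nd.getD nid 0 else 0

-- the 'ss' loop: for nid in list(nids): if nodeDepth(nid) < d: ss.append(nid)
def pvSsA (d : Int) (nd : PySem.Dict Int Int) (nids : List Int) : List Int :=
  nids.foldl (fun ss nid => if pvNodeDepthA nd nid < d then ss ++ [nid] else ss) []

-- the 'ee' loop followed by '_edges = dict(ee)'
def pvEdgesA (d : Int) (edges : PySem.Dict Int (List Int)) (nd : PySem.Dict Int Int) : PySem.Dict Int (List Int) :=
  PySem.Dict.ofList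
    (edges.items.foldl (fun ee i => ee ++ [(i.1, PySem.Set.ofList (pvSsA d nd i.2))]) [])

-- inner 'def _elem(nid, nids)' (the early-return loop over m is List.all)
def pvElemA (d : Int) (edges : PySem.Dict Int (List Int)) (nd : PySem.Dict Int Int)
    (nid : Int) (nids : List Int) : Bool :=
  match (pvEdgesA d edges nd).get? nid with
  | some m => m.all (fun n => nids.contains n)
  | none => true

def addBypassNode_py (d : Int) (edges : List (Int × List Int)) (nd : List (Int × Int)) (dg : List (Int × List Int × List Int)) : List (Int × List Int × List Int) :=
  if (PySem.Dict.ofList dg).contains d then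
    if (PySem.Dict.ofList dg).contains (d - 1) then
      match (PySem.Dict.ofList dg).get? d, (PySem.Dict.ofList dg).get? (d - 1) with
      | some (nids0, skipnids0), some (nids1, skipnids1) =>
          ((PySem.Dict.ofList dg).insert (d - 1)
            (nids1,
              skipnids0.foldl
                (fun sk i => if !(pvElemA d (PySem.Dict.ofList edges) (PySem.Dict.ofList nd) i nids1) then sk ++ [i] else sk)
                (nids0.foldl
                  (fun sk i => if !(pvElemA d (PySem.Dict.ofList edges) (PySem.Dict.ofList nd) i nids1) then sk ++ [i] else sk)
                  skipnids1))).items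
      | _, _ => (PySem.Dict.ofList dg).items   -- unreachable: both keys present
    else (PySem.Dict.ofList dg).items
  else (PySem.Dict.ofList dg).items

-- ===== PORT B =====
-- 'bad = {t for ts in edges.values() for t in ts if nd.get(t, 0) < d and t not in present}'
def pvBadB (d : Int) (edges : PySem.Dict Int (List Int)) (nd : PySem.Dict Int Int)
    (present : PySem.Set Int) : PySem.Set Int :=
  edges.values.foldl
    (fun s ts =>
      ts.foldl (fun s t =>
        if nd.getD t 0 < d && !(PySem.Set.contains present t) then PySem.Set.add s t else s) s)
    PySem.Set.empty

def addBypassNode_py_alt (d : Int) (edges : List (Int × List Int)) (nd : List (Int × Int)) (dg : List (Int × List Int × List Int)) : List (Int × List Int × List Int) :=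
  match (PySem.Dict.ofList dg).get? d with
  | none => (PySem.Dict.ofList dg).items
  | some (nids0, skipnids0) =>
    match (PySem.Dict.ofList dg).get? (d - 1) with
    | none => (PySem.Dict.ofList dg).items
    | some (nids1, skipnids1) =>
        let bad := pvBadB d (PySem.Dict.ofList edges) (PySem.Dict.ofList nd) (PySem.Set.ofList nids1)
        ((PySem.Dict.ofList dg).insert (d - 1)
          (nids1, skipnids1 ++
            (nids0 ++ skipnids0).filter
              (fun i => !(PySem.Set.isdisjoint bad ((PySem.Dict.ofList edges).getD i []))))).items

-- ===== PRECONDITION & SPEC =====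
def Spec_addBypassNode_py (d : Int) (edges : List (Int × List Int)) (nd : List (Int × Int)) (dg : List (Int × List Int × List Int)) (out : List (Int × List Int × List Int)) : Prop := out = addBypassNode_py_alt d edges nd dg
instance (d : Int) (edges : List (Int × List Int)) (nd : List (Int × Int)) (dg : List (Int × List Int × List Int)) (out : List (Int × List Int × List Int)) : Decidable (Spec_addBypassNode_py d edges nd dg out) := by unfold Spec_addBypassNode_py; infer_instance

-- ===== CLAIM (what is proved, stated in full; the proofs are below) =====
def Claim_equal_addBypassNode_py : Prop := ∀ (d : Int) (edges : List (Int × List Int)) (nd : List (Int × Int)) (dg : List (Int × List Int × List Int)), Dom_addBypassNode_py d edges nd dg → Spec_addBypassNode_py d edges nd dg (addBypassNode_py d edges nd dg)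

-- ===== LEMMAS AND PROOFS =====

-- ofList of a list with pairwise-distinct keys is just the list
lemma pv_ofList_of_nodup_keys {ν : Type} (l : List (Int × ν))
    (h : (l.map Prod.fst).Nodup) : PySem.Dict.ofList l = PySem.Dict.mk l := by
  apply PySem.Dict.ext
  show (PySem.Dict.empty.update l).items = l
  unfold PySem.Dict.update
  rw [PySem.Dict.items_foldl_insert_fresh l Prod.fst Prod.snd PySem.Dict.empty
        (by intro a _; simp [PySem.Dict.contains_empty]) h]
  simp [PySem.Dict.empty]

-- an if-Prop append loop is an append of a filter (wrapper over the library's Bool form)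
lemma pv_foldl_ite_append {α : Type} (P : α → Prop) [DecidablePred P] (l acc : List α) :
    l.foldl (fun acc x => if P x then acc ++ [x] else acc) acc
      = acc ++ l.filter (fun x => decide (P x)) := by
  simpa using PySem.List.foldl_append_if (fun x => decide (P x)) id l acc

lemma pv_nodeDepth_eq (nd : PySem.Dict Int Int) (nid : Int) :
    pvNodeDepthA nd nid = nd.getD nid 0 := by
  unfold pvNodeDepthA
  by_cases h : nd.contains nid = true
  · rw [if_pos h]
  · rw [if_neg h]
    exact (PySem.Dict.getD_of_not_contains nd 0 (by simpa using h)).symm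

lemma pv_get?_edgesA (d : Int) (edges : PySem.Dict Int (List Int)) (nd : PySem.Dict Int Int)
    (hk : edges.keys.Nodup) (nid : Int) :
    (pvEdgesA d edges nd).get? nid
      = (edges.get? nid).map (fun ts => PySem.Set.ofList (pvSsA d nd ts)) := by
  unfold pvEdgesA
  rw [PySem.List.foldl_append_singleton_eq_map
        (f := fun i : Int × List Int => (i.1, PySem.Set.ofList (pvSsA d nd i.2)))
        (l := edges.items) (acc := [])]
  simp only [List.nil_append]
  rw [pv_ofList_of_nodup_keys _
        (by simpa [PySem.Dict.keys, List.map_map, Function.comp] using hk)]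
  simp only [PySem.Dict.get?, List.find?_map, Function.comp_def]
  cases List.find? (fun p => p.1 == nid) edges.items <;> rfl

-- membership in the inner conditional-add fold
lemma pv_mem_foldl_add_if (P : Int → Bool) (l : List Int) (s : PySem.Set Int) (x : Int) :
    x ∈ l.foldl (fun s t => if P t then PySem.Set.add s t else s) s
      ↔ x ∈ s ∨ (x ∈ l ∧ P x = true) := by
  induction l generalizing s with
  | nil => simp
  | cons a l ih =>
    simp only [List.foldl_cons, ih]
    by_cases h : P a = true
    · rw [if_pos h, PySem.Set.mem_add]
      constructor
      · rintro (⟨hs | rfl⟩ | ⟨hl, hp⟩)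
        · exact Or.inl hs
        · exact Or.inr ⟨List.mem_cons_self, h⟩
        · exact Or.inr ⟨List.mem_cons_of_mem _ hl, hp⟩
      · rintro (hs | ⟨hl, hp⟩)
        · exact Or.inl (Or.inl hs)
        · rcases List.mem_cons.mp hl with rfl | hl
          · exact Or.inl (Or.inr rfl)
          · exact Or.inr ⟨hl, hp⟩
    · rw [if_neg h]
      constructor
      · rintro (hs | ⟨hl, hp⟩)
        · exact Or.inl hs
        · exact Or.inr ⟨List.mem_cons_of_mem _ hl, hp⟩
      · rintro (hs | ⟨hl, hp⟩)
        · exact Or.inl hs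
        · rcases List.mem_cons.mp hl with rfl | hl
          · exact absurd hp h
          · exact Or.inr ⟨hl, hp⟩

-- membership characterisation of B's bad set
lemma pv_mem_badB (d : Int) (edges : PySem.Dict Int (List Int)) (nd : PySem.Dict Int Int)
    (nids1 : List Int) (x : Int) :
    x ∈ pvBadB d edges nd (PySem.Set.ofList nids1)
      ↔ ∃ ts ∈ edges.values, x ∈ ts ∧ nd.getD x 0 < d ∧ x ∉ nids1 := by
  unfold pvBadB
  have key : ∀ (l : List (List Int)) (s : PySem.Set Int),
      x ∈ l.foldl (fun s ts => ts.foldl (fun s t =>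
            if nd.getD t 0 < d && !(PySem.Set.contains (PySem.Set.ofList nids1) t)
            then PySem.Set.add s t else s) s) s
        ↔ x ∈ s ∨ ∃ ts ∈ l, x ∈ ts ∧ nd.getD x 0 < d ∧ x ∉ nids1 := by
    intro l
    induction l with
    | nil => simp
    | cons a l ih =>
      intro s
      simp only [List.foldl_cons, ih, pv_mem_foldl_add_if]
      constructor
      · rintro (((hs | ⟨ha, hp⟩) | ⟨ts, hts, hx⟩))
        · exact Or.inl hs
        · refine Or.inr ⟨a, List.mem_cons_self, ha, ?_⟩
          simp only [Bool.and_eq_true, Bool.not_eq_true', decide_eq_true_eq] at hp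
          refine ⟨hp.1, ?_⟩
          intro hm
          have := (PySem.Set.contains_iff (PySem.Set.ofList nids1) x).mpr
            ((PySem.Set.mem_ofList nids1 x).mpr hm)
          rw [hp.2] at this
          exact Bool.false_ne_true this
        · exact Or.inr ⟨ts, List.mem_cons_of_mem _ hts, hx⟩
      · rintro (hs | ⟨ts, hts, hx, hlt, hnin⟩)
        · exact Or.inl (Or.inl hs)
        · rcases List.mem_cons.mp hts with rfl | hts
          · refine Or.inl (Or.inr ⟨hx, ?_⟩)
            simp only [Bool.and_eq_true, Bool.not_eq_true', decide_eq_true_eq]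
            refine ⟨hlt, ?_⟩
            rw [Bool.eq_false_iff]
            intro hc
            exact hnin ((PySem.Set.mem_ofList nids1 x).mp ((PySem.Set.contains_iff _ x).mp hc))
          · exact Or.inr ⟨ts, hts, hx, hlt, hnin⟩
  rw [key]
  simp

lemma pv_values_of_get? (edges : PySem.Dict Int (List Int)) (i : Int) (ts : List Int)
    (h : edges.get? i = some ts) : ts ∈ edges.values := by
  have := PySem.Dict.mem_items_of_get?_eq_some edges h
  show ts ∈ edges.items.map Prod.snd
  exact List.mem_map.mpr ⟨(i, ts), this, rfl⟩

-- per-candidate agreement: A's _elem equals B's disjointness test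
lemma pv_elem_eq_disjoint (d : Int) (edges : PySem.Dict Int (List Int)) (nd : PySem.Dict Int Int)
    (hk : edges.keys.Nodup) (i : Int) (nids1 : List Int) :
    pvElemA d edges nd i nids1
      = PySem.Set.isdisjoint (pvBadB d edges nd (PySem.Set.ofList nids1)) (edges.getD i []) := by
  unfold pvElemA
  rw [pv_get?_edgesA d edges nd hk i, PySem.Dict.getD_eq_get?_getD]
  cases h : edges.get? i with
  | none =>
    simp only [Option.map_none, Option.getD_none]
    rw [Bool.eq_iff_iff, PySem.Set.isdisjoint_iff]
    simp
  | some ts =>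
    simp only [Option.map_some, Option.getD_some]
    rw [Bool.eq_iff_iff, PySem.Set.isdisjoint_iff]
    unfold pvSsA
    rw [pv_foldl_ite_append (fun nid => pvNodeDepthA nd nid < d)]
    simp only [List.nil_append, List.all_eq_true, PySem.Set.mem_ofList, List.mem_filter,
      decide_eq_true_eq, pv_nodeDepth_eq, List.contains_iff_mem]
    constructor
    · intro hA x hxbad hxts
      rcases (pv_mem_badB d edges nd nids1 x).mp hxbad with ⟨_, _, _, hlt, hnin⟩
      exact hnin (by simpa using hA x ⟨hxts, hlt⟩)
    · intro hB x ⟨hxts, hlt⟩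
      by_contra hnin
      exact hB x ((pv_mem_badB d edges nd nids1 x).mpr
        ⟨ts, pv_values_of_get? edges i ts h, hxts, hlt, by simpa using hnin⟩) hxts

-- ===== VERDICT (by name: the statement is the Claim_ definition above) =====
theorem addBypassNode_py_spec : Claim_equal_addBypassNode_py := by
  intro d edges nd dg _
  unfold Spec_addBypassNode_py addBypassNode_py addBypassNode_py_alt
  rw [PySem.Dict.contains_eq_isSome_get? (PySem.Dict.ofList dg) d,
      PySem.Dict.contains_eq_isSome_get? (PySem.Dict.ofList dg) (d - 1)]
  cases h0 : (PySem.Dict.ofList dg).get? d with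
  | none => simp
  | some p0 =>
    cases h1 : (PySem.Dict.ofList dg).get? (d - 1) with
    | none => simp
    | some p1 =>
      obtain ⟨nids0, skipnids0⟩ := p0
      obtain ⟨nids1, skipnids1⟩ := p1
      simp only [Option.isSome_some, if_true]
      have hk : (PySem.Dict.ofList edges).keys.Nodup := PySem.Dict.nodup_keys_ofList edges
      have hstep : ∀ (l acc : List Int),
          l.foldl (fun sk i =>
            if !(pvElemA d (PySem.Dict.ofList edges) (PySem.Dict.ofList nd) i nids1) then sk ++ [i] else sk) acc
          = acc ++ l.filter (fun i =>
              !(PySem.Set.isdisjoint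
                  (pvBadB d (PySem.Dict.ofList edges) (PySem.Dict.ofList nd) (PySem.Set.ofList nids1))
                  ((PySem.Dict.ofList edges).getD i []))) := by
        intro l acc
        have h := PySem.List.foldl_append_if
          (fun i => !(pvElemA d (PySem.Dict.ofList edges) (PySem.Dict.ofList nd) i nids1)) id l acc
        simp only [List.map_id] at h
        rw [show (fun i => !(PySem.Set.isdisjoint
              (pvBadB d (PySem.Dict.ofList edges) (PySem.Dict.ofList nd) (PySem.Set.ofList nids1))
              ((PySem.Dict.ofList edges).getD i [])))
              = (fun i => !(pvElemA d (PySem.Dict.ofList edges) (PySem.Dict.ofList nd) i nids1)) from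
            funext (fun i => by rw [pv_elem_eq_disjoint d _ _ hk i nids1])]
        exact h
      rw [hstep, hstep, List.append_assoc, ← List.filter_append]
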